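-- pv_equiv track=rewrite | github.com/supriya0899/leetcode | 762. Prime Number of Set Bits in Binary Representation.py | countPrimeSetBits
-- ===== SOURCE A (Python) =====
-- def countPrimeSetBits(left: int, right: int) -> int:
--
--     binary = []
--
--     for i in range(left, right+1):
--         binary.append(format(i, "b"))
--
--
--     ans = []
--
--     for x in binary:
--         ans.append(x.count('1'))
--
--     def prime_check(num):
--         if num == 1:
--             return False
--
--         for i in range(2, num):
--             if num % i == 0:
--                 return False
--         return True
--
--     count = 0
--     for i in ans:
--         if prime_check(i):
--             count += 1
--     return count
-- ===== SOURCE B (Python) =====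
-- # B: combinatorial digit-DP — counts numbers with each prime popcount via binomial
-- # sums over the bits of the range endpoints, O(log^2 right) instead of scanning the range.
-- # Intended difference: A's trial-division helper calls 0 "prime", so A also counts the
-- # integer 0 (popcount 0); B does not count it.
--
-- _PRIMES = (2, 3, 5, 7, 11, 13, 17, 19, 23, 29, 31)
--
--
-- def _comb(n, k):
--     if k < 0 or k > n:
--         return 0
--     r = 1
--     for i in range(k):
--         r = r * (n - i) // (i + 1)
--     return r
--
--
-- def _upto(n):
--     # how many k in [0..n] (n >= -1) have a prime popcount
--     if n < 0:
--         return 0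
--     total = 0
--     ones = 0
--     for b in range(n.bit_length() - 1, -1, -1):
--         if (n >> b) & 1:
--             for p in _PRIMES:
--                 if ones <= p <= ones + b:
--                     total += _comb(b, p - ones)
--             ones += 1
--     if ones in _PRIMES:
--         total += 1
--     return total
--
--
-- def _signed(n):
--     # signed prefix count over popcount(abs(i)): [0..n] for n >= 0, -[n+1..-1] for n < 0
--     if n >= 0:
--         return _upto(n)
--     return -_upto(-n - 1)
--
--
-- def countPrimeSetBits(left: int, right: int) -> int:
--     if left > right:
--         return 0
--     return _signed(right) - _signed(left - 1)
-- ===== Notes on version B (the rewrite author's own statement) =====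
-- stated objective: faster
-- what changed: Replaces A's scan of every integer in the range (binary string formatting, '1'-count, trial-division primality per element) with a combinatorial digit-DP: a signed prefix count built from binomial sums over the bits of the two endpoints.
-- intended difference: On ranges with left <= 0 <= right, A's trial-division helper returns True for 0 and so A also counts the integer 0 (popcount 0, which is not prime); B returns one less, the intended count of prime-popcount numbers. — e.g. on countPrimeSetBits(0, 0): A returns 1, B returns 0
import Mathlib
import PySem

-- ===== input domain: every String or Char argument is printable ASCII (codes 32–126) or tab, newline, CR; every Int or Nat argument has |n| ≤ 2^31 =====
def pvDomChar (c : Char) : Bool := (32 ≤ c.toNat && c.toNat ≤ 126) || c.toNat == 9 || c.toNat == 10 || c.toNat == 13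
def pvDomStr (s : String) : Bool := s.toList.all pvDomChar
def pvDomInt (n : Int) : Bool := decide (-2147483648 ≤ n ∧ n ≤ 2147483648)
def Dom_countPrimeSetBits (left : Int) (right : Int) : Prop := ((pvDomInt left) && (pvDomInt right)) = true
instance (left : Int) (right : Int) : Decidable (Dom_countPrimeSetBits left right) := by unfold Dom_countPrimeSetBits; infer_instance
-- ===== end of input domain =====

-- B replaces A's per-number scan of the whole range (binary string, count of '1',
-- trial division) by a combinatorial digit-count over the bits of the endpoints.
-- Intended difference (D_ below): A's trial-division helper returns True for 0,
-- so A also counts the integer 0 (whose popcount is 0); B does not.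

-- ===== PORT A =====
-- prime_check's loop with Python's early 'return False'
def pvPrimeCheckGo (num : Int) : List Int → Bool
  | [] => true
  | i :: rest => if PySem.Int.mod num i = 0 then false else pvPrimeCheckGo num rest

def pvPrimeCheck (num : Int) : Bool :=
  if num = 1 then false else pvPrimeCheckGo num (PySem.List.pyRange 2 num 1)

def countPrimeSetBits (left : Int) (right : Int) : Int :=
  let binary := (PySem.List.pyRange left (right + 1) 1).foldl
      (fun acc i => acc ++ [PySem.Int.toBin i]) []          -- format(i, "b")
  let ans := binary.foldl
      (fun acc x => acc ++ [(PySem.Str.count x "1" : Int)]) []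
  ans.foldl (fun count i => if pvPrimeCheck i then count + 1 else count) 0

-- ===== PORT B =====
def pvPrimes : List Int := [2, 3, 5, 7, 11, 13, 17, 19, 23, 29, 31]

-- _comb(n, k): multiplicative binomial, r = r * (n - i) // (i + 1)
def pvComb (n : Int) (k : Int) : Int :=
  if k < 0 ∨ n < k then 0
  else (PySem.List.pyRange 0 k 1).foldl
    (fun r i => PySem.Int.floordiv (r * (n - i)) (i + 1)) 1

-- loop body of _upto: b runs over bit positions, st = (total, ones);
-- b ≥ 0 on every element of the loop's range, so `b.toNat` is Python's `n >> b` exactly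
def pvUptoStep (n : Int) (st : Int × Int) (b : Int) : Int × Int :=
  if PySem.Int.band (n >>> b.toNat) 1 = 1 then
    (pvPrimes.foldl
       (fun t p => if st.2 ≤ p ∧ p ≤ st.2 + b then t + pvComb b (p - st.2) else t) st.1,
     st.2 + 1)
  else st

def pvUpto (n : Int) : Int :=
  if n < 0 then 0
  else
    let st := (PySem.List.pyRange ((PySem.Int.bitLength n : Int) - 1) (-1) (-1)).foldl
      (pvUptoStep n) (0, 0)
    if pvPrimes.contains st.2 then st.1 + 1 else st.1

def pvSigned (n : Int) : Int := if 0 ≤ n then pvUpto n else -pvUpto (-n - 1)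

def countPrimeSetBits_alt (left : Int) (right : Int) : Int :=
  if right < left then 0 else pvSigned right - pvSigned (left - 1)

-- ===== PRECONDITION & SPEC =====
-- On ranges containing 0, A's trial-division helper calls 0 "prime" and A counts the
-- integer 0 (popcount 0, not prime); B returns one less there, the intended count.
def D_countPrimeSetBits (left : Int) (right : Int) : Prop := left ≤ 0 ∧ 0 ≤ right
instance (left : Int) (right : Int) : Decidable (D_countPrimeSetBits left right) := by
  unfold D_countPrimeSetBits; infer_instance

def Spec_countPrimeSetBits (left : Int) (right : Int) (out : Int) : Prop :=
  ¬ D_countPrimeSetBits left right → out = countPrimeSetBits_alt left right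
instance (left : Int) (right : Int) (out : Int) : Decidable (Spec_countPrimeSetBits left right out) := by
  unfold Spec_countPrimeSetBits; infer_instance

def pvDiffWitness_countPrimeSetBits : Int × Int := (0, 0)
def pvDiffWitnessOut_countPrimeSetBits : Int × Int := (1, 0)

-- ===== CLAIM (what is proved, stated in full; the proofs are below) =====
def Claim_unchanged_countPrimeSetBits : Prop := ∀ (left : Int) (right : Int), Dom_countPrimeSetBits left right → Spec_countPrimeSetBits left right (countPrimeSetBits left right)
def Claim_changed_countPrimeSetBits : Prop := Dom_countPrimeSetBits (pvDiffWitness_countPrimeSetBits.1) (pvDiffWitness_countPrimeSetBits.2) ∧ D_countPrimeSetBits (pvDiffWitness_countPrimeSetBits.1) (pvDiffWitness_countPrimeSetBits.2) ∧ countPrimeSetBits (pvDiffWitness_countPrimeSetBits.1) (pvDiffWitness_countPrimeSetBits.2) = pvDiffWitnessOut_countPrimeSetBits.1 ∧ countPrimeSetBits_alt (pvDiffWitness_countPrimeSetBits.1) (pvDiffWitness_countPrimeSetBits.2) = pvDiffWitnessOut_countPrimeSetBits.2 ∧ pvDiffWitnessOut_countPrimeSetBits.1 ≠ pvDiffWi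tnessOut_countPrimeSetBits.2
def Claim_exact_countPrimeSetBits : Prop := ∀ (left : Int) (right : Int), Dom_countPrimeSetBits left right → D_countPrimeSetBits left right → countPrimeSetBits left right ≠ countPrimeSetBits_alt left right

-- ===== LEMMAS AND PROOFS =====


def pcN : Nat → Nat
  | 0 => 0
  | (n+1) => (n+1) % 2 + pcN ((n+1)/2)

lemma pcN_zero : pcN 0 = 0 := by simp [pcN]

lemma pcN_eq (n : Nat) : pcN n = n % 2 + pcN (n / 2) := by
  cases n with
  | zero => simp [pcN]
  | succ m => rw [pcN]

lemma pcN_one : pcN 1 = 1 := by rw [pcN_eq]; simp [pcN_zero]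

def primesN : List Nat := [2, 3, 5, 7, 11, 13, 17, 19, 23, 29, 31]
def isPr (k : Nat) : Bool := primesN.contains k

lemma pcN_ne_zero : ∀ n : Nat, n ≠ 0 → pcN n ≠ 0 := by
  intro n
  induction n using Nat.strong_induction_on with
  | _ n ih =>
    intro hn
    rw [pcN_eq]
    rcases Nat.even_or_odd n with he | ho
    · have hm : n % 2 = 0 := Nat.even_iff.mp he
      have h2 : n / 2 ≠ 0 := by omega
      have := ih (n / 2) (by omega) h2
      omega
    · have : n % 2 = 1 := Nat.odd_iff.mp ho
      omega

lemma pcN_le : ∀ (b n : Nat), n < 2 ^ b → pcN n ≤ b := by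
  intro b
  induction b with
  | zero => intro n h; interval_cases n; simp [pcN]
  | succ b ih =>
    intro n h
    rw [pcN_eq]
    have h1 := ih (n / 2) (by omega)
    have h2 : n % 2 ≤ 1 := by omega
    omega

lemma pcN_shift : ∀ (m k : Nat), k < 2 ^ m → pcN (2 ^ m + k) = pcN k + 1 := by
  intro m
  induction m with
  | zero =>
    intro k h; interval_cases k; rw [pcN_eq]; simp [pcN_zero]
  | succ m ih =>
    intro k h
    rw [pcN_eq (2 ^ (m+1) + k)]
    have h2 : (2 ^ (m+1) + k) % 2 = k % 2 := by
      have : 2 ^ (m+1) % 2 = 0 := by simp [Nat.pow_succ, Nat.mul_mod_left]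
      omega
    have h3 : (2 ^ (m+1) + k) / 2 = 2 ^ m + k / 2 := by
      have : 2 ^ (m+1) = 2 ^ m * 2 := by ring
      omega
    rw [h2, h3, ih (k / 2) (by omega), pcN_eq k]
    omega

-- Chars.count.go with the single-character needle "1" counts '1' characters
lemma countgo_one : ∀ (l : List Char) (fuel acc : Nat), l.length ≤ fuel →
    PySem.Chars.count.go ['1'] fuel l acc = acc + l.count '1' := by
  intro l
  induction l with
  | nil =>
    intro fuel acc _
    cases fuel <;> simp [PySem.Chars.count.go]
  | cons h t ih =>
    intro fuel acc hf
    cases fuel with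
    | zero => simp at hf
    | succ f =>
      have hf' : t.length ≤ f := by simpa using hf
      rw [PySem.Chars.count.go]
      by_cases hh : h = '1'
      · rw [if_pos (by simp [List.isPrefixOf, hh])]
        have hd : List.drop (['1'] : List Char).length (h :: t) = t := by simp
        rw [hd, ih f (acc + 1) hf']
        simp [List.count_cons, hh]
        omega
      · rw [if_neg (by simp [List.isPrefixOf]; exact fun hx => hh hx.symm)]
        rw [ih f acc hf']
        simp [List.count_cons, hh, fun hx : '1' = h => hh hx.symm]

lemma toDigitsCore_count : ∀ (fuel n : Nat) (ds : List Char), n < fuel →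
    (Nat.toDigitsCore 2 fuel n ds).count '1' = pcN n + ds.count '1' := by
  intro fuel
  induction fuel with
  | zero => intro n ds h; omega
  | succ f ih =>
    intro n ds h
    rw [Nat.toDigitsCore]
    by_cases h0 : n / 2 = 0
    · rw [if_pos h0]
      have : n = 0 ∨ n = 1 := by omega
      rcases this with rfl | rfl <;>
        simp [Nat.digitChar, List.count_cons, pcN_zero, pcN_one] <;> omega
    · rw [if_neg h0]
      rw [ih (n / 2) _ (by omega), pcN_eq n]
      rcases (show n % 2 = 0 ∨ n % 2 = 1 by omega) with hm | hm <;>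
        simp [hm, Nat.digitChar, List.count_cons] <;> omega

lemma strcount_toBin (i : Int) : PySem.Str.count (PySem.Int.toBin i) "1" = pcN i.natAbs := by
  rw [PySem.Str.count_eq, PySem.Int.toList_toBin]
  have h1 : ("1" : String).toList = ['1'] := rfl
  rw [h1]
  have hgo : ∀ l : List Char, PySem.Chars.count l ['1'] = l.count '1' := by
    intro l
    rw [PySem.Chars.count]
    simp [countgo_one l l.length 0 le_rfl]
  rw [hgo]
  unfold PySem.Int.toBinChars
  by_cases hneg : i < 0
  · rw [if_pos hneg]
    rw [List.count_cons]
    simp only [Nat.toDigits]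
    rw [toDigitsCore_count _ _ _ (Nat.lt_succ_self _)]
    simp
  · rw [if_neg hneg]
    simp only [Nat.toDigits]
    rw [toDigitsCore_count _ _ _ (Nat.lt_succ_self _)]
    have ht : i.toNat = i.natAbs := by omega
    simp [ht]

lemma pyRange_one_nil {a b : Int} (h : b ≤ a) : PySem.List.pyRange a b 1 = [] := by
  rw [List.eq_nil_iff_forall_not_mem]
  intro x hx
  rw [PySem.List.mem_pyRange_one] at hx
  omega

lemma pyRange_add_nat (a : Int) (m : Nat) :
    PySem.List.pyRange a (a + m) 1 = (List.range m).map (fun k : Nat => a + (k : Int)) := by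
  induction m with
  | zero => simp [pyRange_one_nil le_rfl]
  | succ m ih =>
    have h1 : a + ((m : Int) + 1) = (a + m) + 1 := by ring
    push_cast
    rw [h1, PySem.List.pyRange_one_succ_right (by omega), ih, List.range_succ]
    simp

lemma combFold (nn : Nat) : ∀ jj : Nat, jj ≤ nn →
    (PySem.List.pyRange 0 (jj : Int) 1).foldl
      (fun r i => PySem.Int.floordiv (r * ((nn : Int) - i)) (i + 1)) 1
    = (nn.choose jj : Int) := by
  intro jj
  induction jj with
  | zero => intro _; simp [pyRange_one_nil le_rfl]
  | succ j ih =>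
    intro hle
    push_cast
    rw [PySem.List.pyRange_one_succ_right (by omega), List.foldl_append]
    rw [ih (by omega)]
    simp only [List.foldl_cons, List.foldl_nil]
    have hc : (nn.choose j : Int) * ((nn : Int) - j) = (nn.choose (j+1) : Int) * ((j : Int) + 1) := by
      have := Nat.choose_succ_right_eq nn j
      have hsub : ((nn - j : Nat) : Int) = (nn : Int) - j := by omega
      calc (nn.choose j : Int) * ((nn : Int) - j) = ((nn.choose j * (nn - j) : Nat) : Int) := by
            push_cast [hsub]; ring
        _ = ((nn.choose (j+1) * (j+1) : Nat) : Int) := by rw [← this]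
        _ = (nn.choose (j+1) : Int) * ((j : Int) + 1) := by push_cast; ring
    rw [hc, PySem.Int.floordiv_eq_ediv_of_pos (by omega), Int.mul_ediv_cancel _ (by omega)]

lemma pvComb_eq (bb rr : Nat) (h : rr ≤ bb) : pvComb (bb : Int) (rr : Int) = (bb.choose rr : Int) := by
  unfold pvComb
  rw [if_neg (by omega)]
  exact combFold bb rr h

-- countP of a disjoint disjunction splits
lemma countP_or_disjoint {α : Type} (q r : α → Bool) (hdis : ∀ x, q x = true → r x = false) :
    ∀ l : List α, l.countP (fun x => q x || r x) = l.countP q + l.countP r := by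
  intro l
  induction l with
  | nil => simp
  | cons x t ih =>
    by_cases hq : q x = true
    · simp [List.countP_cons, hq, hdis x hq, ih]; omega
    · simp only [Bool.not_eq_true] at hq
      by_cases hr : r x = true <;> simp [List.countP_cons, hq, hr, ih] <;> omega

lemma countRange2pow : ∀ (bb rr : Nat),
    (List.range (2 ^ bb)).countP (fun k => pcN k == rr) = bb.choose rr := by
  intro bb
  induction bb with
  | zero =>
    intro rr
    cases rr <;> simp [List.range_succ, pcN_zero, Nat.choose]
  | succ bb ih =>
    intro rr
    have hsplit : (2 : Nat) ^ (bb + 1) = 2 ^ bb + 2 ^ bb := by ring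
    rw [hsplit, List.range_add, List.countP_append, List.countP_map]
    have hcg : (List.range (2 ^ bb)).countP ((fun k => pcN k == rr) ∘ (fun x => 2 ^ bb + x))
        = (List.range (2 ^ bb)).countP (fun k => pcN k + 1 == rr) := by
      apply List.countP_congr
      intro x hx
      rw [List.mem_range] at hx
      simp [Function.comp, pcN_shift bb x hx]
    rw [hcg]
    cases rr with
    | zero =>
      have h0 : (List.range (2 ^ bb)).countP (fun k => pcN k + 1 == 0) = 0 := by
        rw [List.countP_eq_zero]
        intro a _
        simp
      rw [ih 0, h0]
      simp
    | succ r =>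
      have h1 : (List.range (2 ^ bb)).countP (fun k => pcN k + 1 == r + 1)
          = (List.range (2 ^ bb)).countP (fun k => pcN k == r) := by
        apply List.countP_congr
        intro x _
        simp
      rw [h1, ih (r + 1), ih r, Nat.choose_succ_succ']
      omega

lemma countP_mem_sum (g : Nat → Nat) : ∀ (ps : List Nat), ps.Nodup → ∀ (l : List Nat),
    l.countP (fun k => ps.contains (g k)) = (ps.map (fun p => l.countP (fun k => g k == p))).sum := by
  intro ps
  induction ps with
  | nil => intro _ l; simp
  | cons p ps ih =>
    intro hnd l
    have hfun : (fun k => (p :: ps).contains (g k)) = (fun k => (g k == p) || ps.contains (g k)) := by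
      funext k; rw [List.contains_cons]
    rw [hfun, countP_or_disjoint _ _ ?hdis l, ih hnd.of_cons l]
    · simp
    case hdis =>
      intro x hx
      have : g x = p := by simpa using hx
      have hp : p ∉ ps := (List.nodup_cons.mp hnd).1
      rw [this]
      simpa using hp

-- each prime's contribution to the inner loop of _upto
lemma primeTerm (bb oo p : Nat) :
    (if (oo : Int) ≤ (p : Int) ∧ (p : Int) ≤ (oo : Int) + (bb : Int) then pvComb (bb : Int) ((p : Int) - (oo : Int)) else 0)
      = (((List.range (2 ^ bb)).countP (fun k => pcN k + oo == p) : Nat) : Int) := by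
  by_cases h1 : oo ≤ p
  · by_cases h2 : p ≤ oo + bb
    · rw [if_pos (by omega)]
      have hcast : ((p : Int) - (oo : Int)) = ((p - oo : Nat) : Int) := by omega
      rw [hcast, pvComb_eq bb (p - oo) (by omega)]
      have : (List.range (2 ^ bb)).countP (fun k => pcN k + oo == p)
          = (List.range (2 ^ bb)).countP (fun k => pcN k == p - oo) := by
        apply List.countP_congr
        intro x _
        constructor <;> intro hx <;> simp_all <;> omega
      rw [this, countRange2pow]
    · rw [if_neg (by omega)]
      have : (List.range (2 ^ bb)).countP (fun k => pcN k + oo == p) = 0 := by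
        rw [List.countP_eq_zero]
        intro a ha
        rw [List.mem_range] at ha
        have := pcN_le bb a ha
        simp
        omega
      rw [this]
      simp
  · rw [if_neg (by omega)]
    have : (List.range (2 ^ bb)).countP (fun k => pcN k + oo == p) = 0 := by
      rw [List.countP_eq_zero]
      intro a _
      simp
      omega
    rw [this]
    simp

lemma primeSum (bb oo : Nat) (t0 : Int) :
    pvPrimes.foldl
      (fun t p => if (oo : Int) ≤ p ∧ p ≤ (oo : Int) + (bb : Int) then t + pvComb (bb : Int) (p - (oo : Int)) else t) t0
    = t0 + (((List.range (2 ^ bb)).countP (fun k => isPr (pcN k + oo)) : Nat) : Int) := by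
  have hfun : (fun (t : Int) (p : Int) => if (oo : Int) ≤ p ∧ p ≤ (oo : Int) + (bb : Int) then t + pvComb (bb : Int) (p - (oo : Int)) else t)
      = (fun t p => t + (if (oo : Int) ≤ p ∧ p ≤ (oo : Int) + (bb : Int) then pvComb (bb : Int) (p - (oo : Int)) else 0)) := by
    funext t p
    split <;> simp
  rw [hfun, PySem.List.foldl_add]
  congr 1
  have hmap : pvPrimes = primesN.map (Nat.cast : Nat → Int) := by rfl
  rw [hmap, List.map_map]
  have hterm : ∀ p ∈ primesN,
      ((fun p : Int => if (oo : Int) ≤ p ∧ p ≤ (oo : Int) + (bb : Int) then pvComb (bb : Int) (p - (oo : Int)) else 0) ∘ (fun p : Nat => (p : Int))) p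
      = (fun p : Nat => (((List.range (2 ^ bb)).countP (fun k => pcN k + oo == p) : Nat) : Int)) p := by
    intro p _
    exact primeTerm bb oo p
  rw [List.map_congr_left hterm]
  simp only [isPr]
  rw [countP_mem_sum (fun k => pcN k + oo) primesN (by decide)]
  rw [Nat.cast_list_sum, List.map_map]
  rfl



lemma descList (bb : Nat) :
    PySem.List.pyRange ((bb : Int) - 1) (-1) (-1) = (PySem.List.pyRange 0 (bb : Int) 1).reverse := by
  rw [PySem.List.pyRange_neg_one_eq_reverse]
  norm_num

lemma bit_high_shift (j bb r : Nat) (h : j < bb) :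
    (2 ^ bb + r) >>> j &&& 1 = r >>> j &&& 1 := by
  rw [Nat.shiftRight_eq_div_pow, Nat.shiftRight_eq_div_pow, Nat.and_one_is_mod, Nat.and_one_is_mod]
  have hdvd : (2:Nat) ^ bb = 2 ^ j * 2 ^ (bb - j) := by rw [← pow_add]; congr 1; omega
  have hq : (2 ^ bb + r) / 2 ^ j = 2 ^ (bb - j) + r / 2 ^ j := by
    rw [hdvd, Nat.add_comm, Nat.add_mul_div_left _ _ (by positivity), Nat.add_comm]
  rw [hq]
  have he : 2 ^ (bb - j) % 2 = 0 := by
    rcases Nat.exists_eq_succ_of_ne_zero (show bb - j ≠ 0 by omega) with ⟨t, ht⟩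
    simp [ht, Nat.pow_succ]
  omega

-- the bit read by pvUptoStep, as Nat arithmetic
lemma step_bit (m : Nat) (j : Int) (hj : 0 ≤ j) :
    PySem.Int.band ((m : Int) >>> j.toNat) 1 = ((m >>> j.toNat &&& 1 : Nat) : Int) := by
  have h1 : ((m : Int) >>> j.toNat) = ((m >>> j.toNat : Nat) : Int) := rfl
  rw [h1]
  have h2 : (1 : Int) = ((1 : Nat) : Int) := rfl
  rw [h2, PySem.Int.band_natCast]

lemma loop_spec : ∀ (bb m : Nat), m < 2 ^ bb → ∀ (t : Int) (oo : Nat),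
    ((PySem.List.pyRange 0 (bb : Int) 1).reverse).foldl (pvUptoStep (m : Int)) (t, (oo : Int))
    = (t + (((List.range m).countP (fun k => isPr (pcN k + oo)) : Nat) : Int),
       ((oo + pcN m : Nat) : Int)) := by
  intro bb
  induction bb with
  | zero =>
    intro m hm t oo
    interval_cases m
    simp [pyRange_one_nil le_rfl, pcN_zero]
  | succ bb ih =>
    intro m hm t oo
    have hcons : (PySem.List.pyRange 0 ((bb + 1 : Nat) : Int) 1).reverse
        = (bb : Int) :: (PySem.List.pyRange 0 (bb : Int) 1).reverse := by
      push_cast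
      rw [PySem.List.pyRange_one_succ_right (by omega), List.reverse_append]
      simp
    rw [hcons, List.foldl_cons]
    have htn : ((bb : Int)).toNat = bb := by simp
    by_cases hlow : m < 2 ^ bb
    · -- high bit is 0: state unchanged
      have hbit : m >>> bb &&& 1 = 0 := by
        rw [Nat.shiftRight_eq_div_pow, Nat.and_one_is_mod]
        have : m / 2 ^ bb = 0 := Nat.div_eq_of_lt hlow
        simp [this]
      have hstep : pvUptoStep (m : Int) (t, (oo : Int)) (bb : Int) = (t, (oo : Int)) := by
        unfold pvUptoStep
        rw [step_bit m (bb : Int) (by omega), htn, hbit]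
        norm_num
      rw [hstep, ih m hlow t oo]
    · -- high bit is 1: m = 2^bb + r
      set r := m - 2 ^ bb with hr
      have hrm : m = 2 ^ bb + r := by omega
      have hrlt : r < 2 ^ bb := by
        have : (2:Nat) ^ (bb+1) = 2 ^ bb + 2 ^ bb := by ring
        omega
      have hbit : m >>> bb &&& 1 = 1 := by
        rw [Nat.shiftRight_eq_div_pow, Nat.and_one_is_mod]
        have hpos : 0 < (2:Nat) ^ bb := by positivity
        have : m / 2 ^ bb = 1 := by
          rw [hrm, Nat.add_comm, Nat.add_div_right _ hpos, Nat.div_eq_of_lt hrlt]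
        simp [this]
      have hstep : pvUptoStep (m : Int) (t, (oo : Int)) (bb : Int)
          = (t + (((List.range (2 ^ bb)).countP (fun k => isPr (pcN k + oo)) : Nat) : Int),
             ((oo + 1 : Nat) : Int)) := by
        unfold pvUptoStep
        rw [step_bit m (bb : Int) (by omega), htn, hbit]
        norm_num
        exact primeSum bb oo t
      rw [hstep]
      -- below bit bb, the bits of m are the bits of r
      have hcong : ∀ (st : Int × Int), ∀ j ∈ (PySem.List.pyRange 0 (bb : Int) 1).reverse,
          pvUptoStep (m : Int) st j = pvUptoStep (r : Int) st j := by
        intro st j hj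
        rw [List.mem_reverse, PySem.List.mem_pyRange_one] at hj
        unfold pvUptoStep
        rw [step_bit m j hj.1, step_bit r j hj.1]
        have hjlt : j.toNat < bb := by omega
        rw [hrm, bit_high_shift j.toNat bb r hjlt]
      rw [PySem.List.foldl_congr_mem _ _ _ _ hcong, ih r hrlt _ (oo + 1)]
      rw [Prod.mk.injEq]
      constructor
      · -- totals agree
        rw [hrm, List.range_add, List.countP_append, List.countP_map]
        have : (List.range r).countP ((fun k => isPr (pcN k + oo)) ∘ (fun x => 2 ^ bb + x))
            = (List.range r).countP (fun k => isPr (pcN k + (oo + 1))) := by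
          apply List.countP_congr
          intro x hx
          rw [List.mem_range] at hx
          have harg : pcN x + 1 + oo = pcN x + (oo + 1) := by omega
          simp only [Function.comp_apply, pcN_shift bb x (by omega : x < 2 ^ bb), harg]
        rw [this]
        push_cast
        ring
      · -- ones agree
        rw [hrm, pcN_shift bb r hrlt]
        push_cast
        ring

-- the count CP m = #{k < m : popcount k prime}
def cpN (m : Nat) : Nat := (List.range m).countP (fun k => isPr (pcN k))

lemma contains_cast (kk : Nat) : pvPrimes.contains ((kk : Nat) : Int) = isPr kk := by
  rw [Bool.eq_iff_iff]
  simp [pvPrimes, isPr, primesN, List.contains_cons]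
  omega

lemma pvUpto_eq_nat (m : Nat) : pvUpto ((m : Nat) : Int) = ((cpN (m + 1) : Nat) : Int) := by
  unfold pvUpto
  rw [if_neg (by omega)]
  have hlt : m < 2 ^ (PySem.Int.bitLength (m : Int)) := by
    have := PySem.Int.lt_two_pow_bitLength (m : Int)
    simpa using this
  have hls := loop_spec (PySem.Int.bitLength (m : Int)) m hlt 0 0
  simp only [Nat.cast_zero, Nat.zero_add, Nat.add_zero, zero_add] at hls
  rw [descList, hls]
  simp only [contains_cast]
  unfold cpN
  rw [List.range_succ, List.countP_append]
  simp only [List.countP_cons, List.countP_nil]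
  by_cases hp : isPr (pcN m)
  · rw [if_pos hp]
    simp [hp]
  · rw [if_neg hp]
    simp only [Bool.not_eq_true] at hp
    simp [hp]

lemma pvUpto_eq (n : Int) (h : 0 ≤ n) : pvUpto n = ((cpN (n.toNat + 1) : Nat) : Int) := by
  have hth := pvUpto_eq_nat n.toNat
  rwa [Int.toNat_of_nonneg h] at hth

lemma pvSigned_nonneg (n : Int) (h : 0 ≤ n) : pvSigned n = ((cpN (n.toNat + 1) : Nat) : Int) := by
  unfold pvSigned
  rw [if_pos h, pvUpto_eq n h]

lemma pvSigned_neg (n : Int) (h : n < 0) : pvSigned n = -((cpN ((-n-1).toNat + 1) : Nat) : Int) := by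
  unfold pvSigned
  rw [if_neg (by omega), pvUpto_eq (-n-1) (by omega)]

-- B's indicator on an integer
def predB (i : Int) : Bool := isPr (pcN i.natAbs)

lemma cnt_pos (m : Nat) : (PySem.List.pyRange 0 (m : Int) 1).countP predB = cpN m := by
  rw [PySem.List.pyRange_zero_natCast, List.countP_map]
  apply List.countP_congr
  intro x _
  simp [predB, Function.comp]

lemma rev_count (f : Nat → Bool) (m : Nat) :
    (List.range m).countP (fun k => f (m - k)) = (List.range m).countP (fun k => f (k + 1)) := by
  have h1 : (List.range m).countP (fun k => f (m - k)) = ((List.range m).map (fun k => m - k)).countP f := by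
    rw [List.countP_map]; rfl
  have h2 : (List.range m).countP (fun k => f (k + 1)) = ((List.range m).map (fun k => k + 1)).countP f := by
    rw [List.countP_map]; rfl
  have h3 : (List.range m).map (fun k => m - k) = (((List.range m).map (fun k => k + 1)).reverse) := by
    apply List.ext_getElem
    · simp
    · intro i h1' h2'
      simp only [List.length_map, List.length_range] at h1'
      simp [List.getElem_reverse]
      omega
  rw [h1, h2, h3, List.countP_reverse]

lemma cnt_negpart (m : Nat) : (PySem.List.pyRange (-(m : Int)) 0 1).countP predB = cpN (m + 1) := by
  have h0 : (0 : Int) = -(m : Int) + m := by ring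
  rw [h0, pyRange_add_nat, List.countP_map]
  have hc : (List.range m).countP (predB ∘ (fun k : Nat => -(m : Int) + k))
      = (List.range m).countP (fun k => isPr (pcN (m - k))) := by
    apply List.countP_congr
    intro x hx
    rw [List.mem_range] at hx
    have habs : ((-(m : Int) + x)).natAbs = m - x := by omega
    simp [predB, Function.comp, habs]
  rw [hc, rev_count (fun k => isPr (pcN k)) m]
  unfold cpN
  rw [List.range_succ_eq_map, List.countP_cons, List.countP_map]
  have h00 : isPr (pcN 0) = false := by rw [pcN_zero]; decide
  simp only [h00, Bool.false_eq_true, if_false, Nat.zero_add]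
  apply List.countP_congr
  intro x _
  simp [Nat.succ_eq_add_one]

-- A as a countP over the scanned range
lemma portA_countP (l r : Int) :
    countPrimeSetBits l r
      = (((PySem.List.pyRange l (r + 1) 1).countP
            (fun i => pvPrimeCheck ((pcN i.natAbs : Nat) : Int)) : Nat) : Int) := by
  unfold countPrimeSetBits
  simp only [PySem.List.foldl_append_singleton_eq_map, List.nil_append,
    PySem.List.foldl_if_add_one, List.map_map, List.countP_map, zero_add]
  congr 1
  apply List.countP_congr
  intro x _
  have h := strcount_toBin x
  rw [PySem.Str.count_eq, PySem.Int.toList_toBin, show ("1" : String).toList = ['1'] from rfl] at h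
  simp [Function.comp, h]

-- trial division agrees with the prime table on every popcount value a 32-bit
-- number can have, except 0 (where prime_check wrongly answers True)
lemma primeCheck_table : ∀ k : Nat, k < 33 → k ≠ 0 → pvPrimeCheck ((k : Nat) : Int) = isPr k := by
  decide

lemma countP_split (p q : Int → Bool) (hp : p 0 = true) (hq : q 0 = false) :
    ∀ l : List Int, (∀ x ∈ l, x ≠ 0 → p x = q x) →
      l.countP p = l.countP q + l.count 0 := by
  intro l
  induction l with
  | nil => simp
  | cons x t ih =>
    intro hx
    have ht := ih (fun y hy => hx y (List.mem_cons_of_mem x hy))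
    by_cases h0 : x = 0
    · subst h0
      simp [List.countP_cons, List.count_cons, hp, hq, ht]
      omega
    · rw [List.countP_cons, List.countP_cons, List.count_cons, ht, hx x (List.mem_cons_self) h0]
      have hb : (x == (0:Int)) = false := by simp [h0]
      simp [hb]
      omega

lemma count_zero_pyRange (l r : Int) (hlr : l ≤ r) :
    ((PySem.List.pyRange l (r + 1) 1).count 0 : Int) = if l ≤ 0 ∧ 0 ≤ r then 1 else 0 := by
  have hm : r + 1 = l + ((r + 1 - l).toNat : Nat) := by omega
  rw [hm, pyRange_add_nat]
  have hnd : ((List.range (r + 1 - l).toNat).map (fun k : Nat => l + k)).Nodup := by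
    apply List.Nodup.map
    · intro a b hab
      have : (a : Int) = (b : Int) := by exact add_left_cancel hab
      exact_mod_cast this
    · exact List.nodup_range
  by_cases h0 : l ≤ 0 ∧ 0 ≤ r
  · rw [if_pos h0]
    have hmem : (0 : Int) ∈ (List.range (r + 1 - l).toNat).map (fun k : Nat => l + k) := by
      rw [List.mem_map]
      exact ⟨(-l).toNat, by rw [List.mem_range]; omega, by omega⟩
    rw [List.count_eq_one_of_mem hnd hmem]
    simp
  · rw [if_neg h0]
    have hmem : (0 : Int) ∉ (List.range (r + 1 - l).toNat).map (fun k : Nat => l + k) := by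
      rw [List.mem_map]
      rintro ⟨k, hk, hk0⟩
      rw [List.mem_range] at hk
      omega
    rw [List.count_eq_zero_of_not_mem hmem]
    simp

lemma cntB (l r : Int) (hlr : l ≤ r) :
    countPrimeSetBits_alt l r = (((PySem.List.pyRange l (r + 1) 1).countP predB : Nat) : Int) := by
  unfold countPrimeSetBits_alt
  rw [if_neg (by omega)]
  by_cases h1 : 1 ≤ l
  · -- whole range positive
    have hRe : (((r + 1).toNat : Nat) : Int) = r + 1 := by omega
    have hLe : ((l.toNat : Nat) : Int) = l := by omega
    have happ := PySem.List.pyRange_one_append 0 ((l.toNat : Nat) : Int) (((r + 1).toNat : Nat) : Int) (by omega) (by omega)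
    have hcnt := congrArg (List.countP predB) happ
    rw [List.countP_append, cnt_pos ((r + 1).toNat), cnt_pos l.toNat, hLe, hRe] at hcnt
    rw [pvSigned_nonneg r (by omega), pvSigned_nonneg (l - 1) (by omega)]
    have e1 : r.toNat + 1 = (r + 1).toNat := by omega
    have e2 : (l - 1).toNat + 1 = l.toNat := by omega
    rw [e1, e2]
    omega
  · by_cases h2 : 0 ≤ r
    · -- range straddles 0 (here l ≤ 0 ≤ r)
      have hMe : -((((-l).toNat : Nat)) : Int) = l := by omega
      have hRe : (((r + 1).toNat : Nat) : Int) = r + 1 := by omega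
      have happ := PySem.List.pyRange_one_append l 0 (r + 1) (by omega) (by omega)
      have hneg := cnt_negpart (-l).toNat
      rw [hMe] at hneg
      have hposc := cnt_pos ((r + 1).toNat)
      rw [hRe] at hposc
      have hcnt := congrArg (List.countP predB) happ
      rw [List.countP_append, hneg, hposc] at hcnt
      rw [pvSigned_nonneg r (by omega), pvSigned_neg (l - 1) (by omega)]
      have e1 : r.toNat + 1 = (r + 1).toNat := by omega
      have e2 : (-(l - 1) - 1).toNat = (-l).toNat := by omega
      rw [e1, e2]
      omega
    · -- whole range negative (r < 0)
      have hM1e : -((((-l).toNat : Nat)) : Int) = l := by omega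
      have hM2e : -((((-(r + 1)).toNat : Nat)) : Int) = r + 1 := by omega
      have happ := PySem.List.pyRange_one_append l (r + 1) 0 (by omega) (by omega)
      have hn1 := cnt_negpart (-l).toNat
      rw [hM1e] at hn1
      have hn2 := cnt_negpart (-(r + 1)).toNat
      rw [hM2e] at hn2
      have hcnt := congrArg (List.countP predB) happ
      rw [List.countP_append, hn1, hn2] at hcnt
      rw [pvSigned_neg r (by omega), pvSigned_neg (l - 1) (by omega)]
      have e1 : (-r - 1).toNat = (-(r + 1)).toNat := by omega
      have e2 : (-(l - 1) - 1).toNat = (-l).toNat := by omega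
      rw [e1, e2]
      omega

theorem pv_main (left right : Int) (h : Dom_countPrimeSetBits left right) :
    countPrimeSetBits left right
      = countPrimeSetBits_alt left right
        + (if left ≤ 0 ∧ 0 ≤ right then 1 else 0) := by
  have hdom : -2147483648 ≤ left ∧ left ≤ 2147483648 ∧ -2147483648 ≤ right ∧ right ≤ 2147483648 := by
    unfold Dom_countPrimeSetBits pvDomInt at h
    simp only [Bool.and_eq_true, decide_eq_true_eq] at h
    omega
  by_cases hlr : right < left
  · rw [portA_countP, pyRange_one_nil (by omega)]
    unfold countPrimeSetBits_alt
    rw [if_pos hlr, if_neg (by omega)]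
    simp
  · push_neg at hlr
    rw [portA_countP]
    have hsplit := countP_split (fun i => pvPrimeCheck ((pcN i.natAbs : Nat) : Int)) predB
      ?hp ?hq (PySem.List.pyRange left (right + 1) 1) ?hpt
    case hp =>
      show pvPrimeCheck ((pcN (0 : Int).natAbs : Nat) : Int) = true
      rw [show (0 : Int).natAbs = 0 from rfl, pcN_zero]
      decide
    case hq =>
      show predB 0 = false
      unfold predB
      rw [show (0 : Int).natAbs = 0 from rfl, pcN_zero]
      decide
    case hpt =>
      intro x hx hx0
      rw [PySem.List.mem_pyRange_one] at hx
      have hlt : x.natAbs < 2 ^ 32 := by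
        have hpow : (2 : Nat) ^ 32 = 4294967296 := by norm_num
        omega
      have hk := pcN_le 32 x.natAbs hlt
      have hk0 : pcN x.natAbs ≠ 0 := pcN_ne_zero _ (by omega)
      exact primeCheck_table (pcN x.natAbs) (by omega) hk0
    rw [cntB left right hlr]
    have hz := count_zero_pyRange left right hlr
    by_cases hD : left ≤ 0 ∧ 0 ≤ right
    · rw [if_pos hD] at hz ⊢
      omega
    · rw [if_neg hD] at hz ⊢
      omega

-- ===== VERDICT (by name: the statement is the Claim_ definition above) =====
theorem countPrimeSetBits_spec : Claim_unchanged_countPrimeSetBits := by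
  intro l r hd hD
  rw [pv_main l r hd]
  unfold D_countPrimeSetBits at hD
  rw [if_neg hD, add_zero]

theorem countPrimeSetBits_changed : Claim_changed_countPrimeSetBits := by
  unfold Claim_changed_countPrimeSetBits; decide

theorem countPrimeSetBits_tight : Claim_exact_countPrimeSetBits := by
  intro l r hd hD
  rw [pv_main l r hd]
  simp [D_countPrimeSetBits] at hD
  simp [hD]
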